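-- pv_equiv track=rewrite | github.com/jmeza1/ZZCeti_Test_Data | ZZCeti_Test_Data/list_read.py | List_Combe
-- ===== SOURCE A (Python) =====
-- def List_Combe(img_list):
--     # This is meant to combe trough list names to identify seperate
--     # stars / flats / standars
--
--     sub_lists= [] # list of sub_list of images
--     sl= [] # sub_list of images
--     sl.append(img_list[0]) # place first image in sublist
--
--     i= 0; # image counter
--     while i < len(img_list)-1: # run trough all images
--         if img_list[i+1].__contains__(img_list[i][4:]) == True:
--             sl.append(img_list[i+1]) # place it in the sub_list
--         else:
--             # if the images dont match:
--             sub_lists.append(sl) # write the sublist to the list of sublist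
--             sl= [] # clear the sublist
--             sl.append(img_list[i+1]) # append the image to the new list
--         i= i+1 # image counter
--     sub_lists.append(sl) # append the last sublist to the list of sublist
--     return sub_lists # return the list of sub_list of images
-- ===== SOURCE B (Python) =====
-- def List_Combe(img_list):
--     # Two-phase: compute group boundary indices, then slice.
--     # Returns [] on empty input (A raises IndexError there).
--     if not img_list:
--         return []
--     bounds = [0]
--     for i in range(len(img_list) - 1):
--         if img_list[i][4:] not in img_list[i + 1]:
--             bounds.append(i + 1)
--     bounds.append(len(img_list))
--     return [img_list[b:e] for b, e in zip(bounds, bounds[1:])]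
-- ===== Notes on version B (the rewrite author's own statement) =====
-- stated objective: alternative
-- what changed: replaced the accumulate-and-flush loop (mutable sublist flushed on mismatch) by a two-phase algorithm: one pass collecting group boundary indices, then slicing the original list between consecutive boundaries
import Mathlib
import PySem

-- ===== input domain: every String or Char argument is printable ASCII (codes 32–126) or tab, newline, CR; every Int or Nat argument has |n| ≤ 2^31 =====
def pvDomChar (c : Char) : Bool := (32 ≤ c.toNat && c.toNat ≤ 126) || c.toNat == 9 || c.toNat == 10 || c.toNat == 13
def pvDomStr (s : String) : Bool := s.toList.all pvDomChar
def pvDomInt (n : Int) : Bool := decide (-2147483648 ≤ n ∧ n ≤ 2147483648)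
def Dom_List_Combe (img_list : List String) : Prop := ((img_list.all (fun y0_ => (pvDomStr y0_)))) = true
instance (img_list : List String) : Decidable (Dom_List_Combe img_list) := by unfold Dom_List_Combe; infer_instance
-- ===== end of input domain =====

-- B groups consecutive names by boundary indices + slicing instead of A's accumulate-and-flush loop;
-- equivalence is about the return value; on the empty list A raises IndexError while B returns [].

-- the shared per-step test: img_list[i+1].__contains__(img_list[i][4:])
def pvCond (img_list : List String) (i : Nat) : Bool :=
  PySem.Str.isIn (PySem.Str.slice (img_list.getD i "") (some 4) none) (img_list.getD (i + 1) "")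

-- ===== PORT A =====
-- the while loop: state (sub_lists, sl), counter i over range(len-1)
def List_Combe (img_list : List String) : List (List String) :=
  match PySem.List.pyGet? img_list 0 with
  | none => []   -- IndexError in Python (empty list); excluded by Pre_
  | some first =>
    let st := (List.range (img_list.length - 1)).foldl
      (fun (st : List (List String) × List String) i =>
        if pvCond img_list i then
          (st.1, st.2 ++ [img_list.getD (i + 1) ""])
        else
          (st.1 ++ [st.2], [img_list.getD (i + 1) ""]))
      ([], [first])
    st.1 ++ [st.2]

-- ===== PORT B =====
-- phase 1: boundary indices; phase 2: slice between consecutive boundaries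
-- (img_list[b:e] for 0 ≤ b ≤ e ≤ len is (drop b).take (e-b), PySem.List.slice_natCast)
def List_Combe_alt (img_list : List String) : List (List String) :=
  if img_list = [] then []
  else
    let n := img_list.length
    let bounds := (List.range (n - 1)).foldl
      (fun (bs : List Nat) i => if ¬ pvCond img_list i then bs ++ [i + 1] else bs) [0]
    let bounds := bounds ++ [n]
    (bounds.zip bounds.tail).map (fun be => (img_list.drop be.1).take (be.2 - be.1))

-- ===== PRECONDITION & SPEC =====
-- A raises IndexError on the empty list (img_list[0]); Pre_ excludes exactly that input.
def Pre_List_Combe (img_list : List String) : Prop := img_list ≠ []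
instance (img_list : List String) : Decidable (Pre_List_Combe img_list) := by
  unfold Pre_List_Combe; infer_instance
def pvWitness_List_Combe : List String := (["abcd1", "xy"])

def Spec_List_Combe (img_list : List String) (out : List (List String)) : Prop :=
  out = List_Combe_alt img_list
instance (img_list : List String) (out : List (List String)) : Decidable (Spec_List_Combe img_list out) := by
  unfold Spec_List_Combe; infer_instance

-- ===== CLAIM (what is proved, stated in full; the proofs are below) =====
def Claim_equal_List_Combe : Prop := ∀ (img_list : List String), Dom_List_Combe img_list → Pre_List_Combe img_list → Spec_List_Combe img_list (List_Combe img_list)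

-- ===== LEMMAS AND PROOFS =====

-- consecutive pairs of a boundary list
def pvPairs (bs : List Nat) : List (Nat × Nat) := bs.zip bs.tail

theorem pvPairs_snoc (bs : List Nat) (l e : Nat) :
    pvPairs ((bs ++ [l]) ++ [e]) = pvPairs (bs ++ [l]) ++ [(l, e)] := by
  induction bs with
  | nil => rfl
  | cons x bs ih =>
    cases bs with
    | nil => rfl
    | cons y bs =>
      simpa [pvPairs] using congrArg (List.cons (x, y)) ih

-- joint invariant of A's flush loop and B's boundary loop after k steps (k < n)
theorem pvInvariant (img_list : List String) (x : String) (hx : img_list.getD 0 "" = x)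
    (k : Nat) (hk : k < img_list.length) :
    ∃ bs l,
      (List.range k).foldl
        (fun (bs : List Nat) i => if ¬ pvCond img_list i then bs ++ [i + 1] else bs) [0]
        = bs ++ [l] ∧
      l ≤ k ∧
      (List.range k).foldl
        (fun (st : List (List String) × List String) i =>
          if pvCond img_list i then (st.1, st.2 ++ [img_list.getD (i + 1) ""])
          else (st.1 ++ [st.2], [img_list.getD (i + 1) ""]))
        ([], [x])
        = ((pvPairs (bs ++ [l])).map (fun be => (img_list.drop be.1).take (be.2 - be.1)),
           (img_list.drop l).take (k + 1 - l)) := by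
  induction k with
  | zero =>
    refine ⟨[], 0, rfl, le_refl 0, ?_⟩
    have h0 : img_list.take 1 = [x] := by
      cases img_list with
      | nil => simp at hk
      | cons a t => simp_all
    simp [pvPairs, h0]
  | succ k ih =>
    obtain ⟨bs, l, hB, hl, hA⟩ := ih (Nat.lt_of_succ_lt hk)
    have hdl : k + 1 - l < (img_list.drop l).length := by
      simp [List.length_drop]; omega
    have hget : (img_list.drop l)[k + 1 - l]? = some (img_list.getD (k + 1) "") := by
      rw [List.getElem?_eq_getElem hdl, List.getElem_drop]
      rw [List.getD_eq_getElem?_getD, List.getElem?_eq_getElem (by omega : k + 1 < img_list.length)]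
      simp [show l + (k + 1 - l) = k + 1 by omega]
    by_cases hc : pvCond img_list k
    · refine ⟨bs, l, ?_, by omega, ?_⟩
      · rw [List.range_succ, List.foldl_append, hB]; simp [hc]
      · rw [List.range_succ, List.foldl_append, hA]
        simp only [List.foldl_cons, List.foldl_nil, hc, if_pos]
        have : k + 1 + 1 - l = (k + 1 - l) + 1 := by omega
        rw [this, List.take_add_one, hget]
        simp
    · refine ⟨bs ++ [l], k + 1, ?_, le_refl _, ?_⟩
      · rw [List.range_succ, List.foldl_append, hB]; simp [hc]
      · rw [List.range_succ, List.foldl_append, hA]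
        simp only [List.foldl_cons, List.foldl_nil, hc, if_neg, Bool.false_eq_true,
          not_false_iff]
        refine Prod.ext ?_ ?_
        · simp only
          rw [pvPairs_snoc]
          simp
        · simp only
          have h1 : k + 1 + 1 - (k + 1) = 1 := by omega
          rw [h1, List.take_add_one]
          have : (img_list.drop (k + 1))[0]? = some (img_list.getD (k + 1) "") := by
            rw [List.getElem?_eq_getElem (by simp [List.length_drop]; omega)]
            simp [List.getD_eq_getElem?_getD, List.getElem?_eq_getElem (by omega : k + 1 < img_list.length)]
          simp [this]

-- ===== VERDICT (by name: the statement is the Claim_ definition above) =====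
theorem List_Combe_spec : Claim_equal_List_Combe := by
  intro img_list _ hpre
  unfold Spec_List_Combe List_Combe List_Combe_alt
  have hn : 0 < img_list.length := List.length_pos_of_ne_nil hpre
  obtain ⟨x, t, hx⟩ : ∃ x t, img_list = x :: t := by
    cases img_list with
    | nil => exact absurd rfl hpre
    | cons a t => exact ⟨a, t, rfl⟩
  have hget0 : PySem.List.pyGet? img_list 0 = some x := by
    subst hx; simp [PySem.List.pyGet?, PySem.List.pyIdx?]
  rw [hget0, if_neg hpre]
  have hgd : img_list.getD 0 "" = x := by subst hx; rfl
  obtain ⟨bs, l, hB, hl, hA⟩ :=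
    pvInvariant img_list x hgd (img_list.length - 1) (by omega)
  simp only [hA, hB]
  rw [show ((bs ++ [l] ++ [img_list.length]).zip (bs ++ [l] ++ [img_list.length]).tail)
        = pvPairs ((bs ++ [l]) ++ [img_list.length]) from rfl, pvPairs_snoc]
  have hk1 : img_list.length - 1 + 1 = img_list.length := by omega
  rw [hk1]
  simp
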